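-- pv_equiv track=rewrite | github.com/J-na/plantenpedia | utils/display.py | first_photo
-- ===== SOURCE A (Python) =====
-- from typing import Dict, List, Optional
--
-- def first_photo(plant: Dict, preferred: Optional[List[str]] = None) -> Optional[Dict]:
--     """Geeft de eerste foto terug in voorkeursvolgorde."""
--     photos = plant.get("photos")
--     if not isinstance(photos, list) or not photos:
--         return None
--     valid = [p for p in photos if isinstance(p, dict) and isinstance(p.get("url"), str) and p["url"]]
--     if not valid:
--         return None
--     order = preferred or ["bloeiwijze", "habitus", "algemeen", "jonge_plant"]
--     for ptype in order:
--         for p in valid: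
--             if p.get("type") == ptype:
--                 return p
--     return valid[0]
-- ===== SOURCE B (Python) =====
-- DEFAULT_ORDER = ["bloeiwijze", "habitus", "algemeen", "jonge_plant"]
--
--
-- def first_photo(plant, preferred=None):
--     """Geeft de eerste foto terug in voorkeursvolgorde."""
--     photos = plant.get("photos")
--     if not isinstance(photos, list) or not photos:
--         return None
--     valid = [p for p in photos
--              if isinstance(p, dict) and isinstance(p.get("url"), str) and p["url"]]
--     if not valid:
--         return None
--     order = preferred or DEFAULT_ORDER
--
--     def rank(p):
--         t = p.get("type")
--         return order.index(t) if t in order else len(order)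
--
--     return min(valid, key=rank)
-- ===== Notes on version B (the rewrite author's own statement) =====
-- stated objective: alternative
-- what changed: Replaces A's nested order-by-valid rescan with a rank function (position of a photo's type in the preference order, len(order) if absent) and a single stable min-by-rank pass over the valid photos via builtin min.
import Mathlib
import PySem

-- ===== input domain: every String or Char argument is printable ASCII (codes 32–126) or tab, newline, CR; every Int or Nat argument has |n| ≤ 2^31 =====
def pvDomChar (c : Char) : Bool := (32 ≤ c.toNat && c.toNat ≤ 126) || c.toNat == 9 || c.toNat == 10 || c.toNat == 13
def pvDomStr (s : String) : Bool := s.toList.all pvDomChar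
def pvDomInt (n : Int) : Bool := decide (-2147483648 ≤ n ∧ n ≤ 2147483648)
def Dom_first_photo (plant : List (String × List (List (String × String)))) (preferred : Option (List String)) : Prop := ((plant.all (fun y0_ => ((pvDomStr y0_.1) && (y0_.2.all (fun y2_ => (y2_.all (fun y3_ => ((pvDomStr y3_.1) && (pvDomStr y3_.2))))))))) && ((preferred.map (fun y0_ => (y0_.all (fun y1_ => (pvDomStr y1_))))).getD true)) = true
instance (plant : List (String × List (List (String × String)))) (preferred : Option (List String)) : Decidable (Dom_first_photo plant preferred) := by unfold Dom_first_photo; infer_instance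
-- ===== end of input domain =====

-- B replaces A's nested order-by-valid rescan with a rank function (position of a photo's type
-- in the preference order, or len(order) if absent) and a single stable min-by-rank pass (alternative).

-- ===== PORT A =====
-- the 'for ptype in order: for p in valid: …' nested loop of A
def pvA_find (order : List String) (valid : List (List (String × String))) :
    Option (List (String × String)) :=
  match order with
  | [] => none
  | ptype :: rest =>
    match valid.find? (fun p => (PySem.Dict.mk p).get? "type" == some ptype) with
    | some p => some p
    | none => pvA_find rest valid

def first_photo (plant : List (String × List (List (String × String)))) (preferred : Option (List String)) : Option (List (String × String)) :=
  match (PySem.Dict.mk plant).get? "photos" with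
  | none => none
  | some photos =>
    if photos.isEmpty then none
    else
      let valid := photos.filter (fun p =>
        match (PySem.Dict.mk p).get? "url" with
        | some u => !(u == "")
        | none => false)
      if valid.isEmpty then none
      else
        let order := match preferred with
          | some l => if l.isEmpty then ["bloeiwijze", "habitus", "algemeen", "jonge_plant"] else l
          | none => ["bloeiwijze", "habitus", "algemeen", "jonge_plant"]
        match pvA_find order valid with
        | some p => some p
        | none => PySem.List.pyGet? valid 0

-- ===== PORT B =====
def pvB_defaultOrder : List String := ["bloeiwijze", "habitus", "algemeen", "jonge_plant"]

-- B's validity filter (the same guard as A's comprehension)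
def pvB_valid (p : List (String × String)) : Bool :=
  match (PySem.Dict.mk p).get? "url" with
  | some u => !(u == "")
  | none => false

-- B's rank(p): 'order.index(t) if t in order else len(order)'
def pvB_rankT (order : List String) (t : String) : Nat :=
  match PySem.List.index? order t with
  | some i => i
  | none => order.length

def pvB_rank (order : List String) (p : List (String × String)) : Nat :=
  match (PySem.Dict.mk p).get? "type" with
  | none => order.length
  | some t => pvB_rankT order t

-- Python's builtin min(…, key=…): running first-minimum loop (replace only on strictly smaller key)
def pvMinLoop {α : Type} (key : α → Nat) (best : α) (bk : Nat) : List α → α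
  | [] => best
  | p :: rest => if key p < bk then pvMinLoop key p (key p) rest else pvMinLoop key best bk rest

def pvB_min {α : Type} (key : α → Nat) : List α → Option α
  | [] => none
  | p :: rest => some (pvMinLoop key p (key p) rest)

def first_photo_alt (plant : List (String × List (List (String × String)))) (preferred : Option (List String)) : Option (List (String × String)) :=
  match (PySem.Dict.mk plant).get? "photos" with
  | none => none
  | some photos =>
    if photos.isEmpty then none
    else
      let valid := photos.filter pvB_valid
      if valid.isEmpty then none
      else
        let order := match preferred with
          | some l => if l.isEmpty then pvB_defaultOrder else l
          | none => pvB_defaultOrder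
        pvB_min (pvB_rank order) valid

-- ===== PRECONDITION & SPEC =====
def Spec_first_photo (plant : List (String × List (List (String × String)))) (preferred : Option (List String)) (out : Option (List (String × String))) : Prop := out = first_photo_alt plant preferred
instance (plant : List (String × List (List (String × String)))) (preferred : Option (List String)) (out : Option (List (String × String))) : Decidable (Spec_first_photo plant preferred out) := by unfold Spec_first_photo; infer_instance

-- ===== CLAIM (what is proved, stated in full; the proofs are below) =====
def Claim_equal_first_photo : Prop := ∀ (plant : List (String × List (List (String × String)))) (preferred : Option (List String)), Dom_first_photo plant preferred → Spec_first_photo plant preferred (first_photo plant preferred)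

-- ===== LEMMAS AND PROOFS =====

theorem pv_rankT_nil (t : String) : pvB_rankT [] t = 0 := by
  unfold pvB_rankT
  rw [PySem.List.index?_eq_idxOf?]
  rfl

theorem pv_rank_nil (p : List (String × String)) : pvB_rank [] p = 0 := by
  unfold pvB_rank
  cases (PySem.Dict.mk p).get? "type" with
  | none => rfl
  | some t => exact pv_rankT_nil t

theorem pv_rankT_cons (t : String) (ts : List String) (t' : String) :
    pvB_rankT (t :: ts) t' = if t' == t then 0 else pvB_rankT ts t' + 1 := by
  unfold pvB_rankT
  by_cases ht : t' = t
  · subst ht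
    rw [PySem.List.index?_cons_self]
    simp
  · rw [PySem.List.index?_cons_of_ne ts (Ne.symm ht)]
    have hb : (t' == t) = false := by simp [ht]
    rw [hb]
    cases hi : PySem.List.index? ts t' with
    | none => simp [List.length_cons]
    | some i => simp

theorem pv_rank_cons (t : String) (ts : List String) (p : List (String × String)) :
    pvB_rank (t :: ts) p =
      if (PySem.Dict.mk p).get? "type" == some t then 0 else pvB_rank ts p + 1 := by
  unfold pvB_rank
  cases h : (PySem.Dict.mk p).get? "type" with
  | none => simp
  | some t' =>
    show pvB_rankT (t :: ts) t' = if (some t' == some t) = true then 0 else pvB_rankT ts t' + 1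
    rw [pv_rankT_cons]
    by_cases ht : t' = t
    · simp [ht]
    · simp [ht]

theorem pv_minLoop_zero {α : Type} (key : α → Nat) (best : α) (l : List α) :
    pvMinLoop key best 0 l = best := by
  induction l generalizing best with
  | nil => rfl
  | cons p rest ih => unfold pvMinLoop; simp [ih]

theorem pv_minLoop_find_zero {α : Type} (key : α → Nat) (q : α) :
    ∀ (l : List α) (best : α) (bk : Nat), 1 ≤ bk →
      l.find? (fun p => key p == 0) = some q → pvMinLoop key best bk l = q := by
  intro l
  induction l with
  | nil => intro best bk _ h; simp at h
  | cons p rest ih =>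
    intro best bk hbk h
    rw [List.find?_cons] at h
    unfold pvMinLoop
    by_cases h0 : key p = 0
    · have he : (key p == 0) = true := by simp [h0]
      rw [he] at h
      injection h with h
      subst h
      rw [if_pos (by omega), h0, pv_minLoop_zero]
    · have hne : (key p == 0) = false := by simp [h0]
      rw [hne] at h
      split
      · exact ih p (key p) (by omega) h
      · exact ih best bk hbk h

theorem pv_minLoop_shift {α : Type} (key key' : α → Nat) :
    ∀ (l : List α) (best : α) (bk : Nat), (∀ p ∈ l, key' p = key p + 1) →
      pvMinLoop key' best (bk + 1) l = pvMinLoop key best bk l := by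
  intro l
  induction l with
  | nil => intro best bk _; rfl
  | cons p rest ih =>
    intro best bk hm
    have hp : key' p = key p + 1 := hm p (List.mem_cons_self ..)
    unfold pvMinLoop
    rw [hp]
    have hrest : ∀ q ∈ rest, key' q = key q + 1 := fun q hq => hm q (List.mem_cons_of_mem _ hq)
    by_cases hlt : key p < bk
    · rw [if_pos (by omega), if_pos hlt, ih p (key p) hrest]
    · rw [if_neg (by omega), if_neg hlt, ih best bk hrest]

-- B's stable min-by-rank over valid equals A's nested loop, with valid[0] as the fallback
theorem pv_min_eq_find (order : List String) (p0 : List (String × String))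
    (rest : List (List (String × String))) :
    pvMinLoop (pvB_rank order) p0 (pvB_rank order p0) rest =
      (pvA_find order (p0 :: rest)).getD p0 := by
  induction order with
  | nil => rw [pv_rank_nil, pv_minLoop_zero]; rfl
  | cons t ts ih =>
    have hpred : (fun p => pvB_rank (t :: ts) p == 0) =
        (fun p : List (String × String) => (PySem.Dict.mk p).get? "type" == some t) := by
      funext p
      rw [pv_rank_cons]
      by_cases hm : ((PySem.Dict.mk p).get? "type" == some t) = true
      · simp [hm]
      · simp only [Bool.not_eq_true] at hm
        simp [hm]
    cases hf : (p0 :: rest).find? (fun p => (PySem.Dict.mk p).get? "type" == some t) with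
    | some q =>
      have hA : pvA_find (t :: ts) (p0 :: rest) = some q := by
        unfold pvA_find; rw [hf]
      rw [hA, Option.getD_some]
      rw [List.find?_cons] at hf
      by_cases h0 : ((PySem.Dict.mk p0).get? "type" == some t) = true
      · rw [h0] at hf
        injection hf with hf
        subst hf
        have hz : pvB_rank (t :: ts) p0 = 0 := by rw [pv_rank_cons, if_pos h0]
        rw [hz, pv_minLoop_zero]
      · have h0' : ((PySem.Dict.mk p0).get? "type" == some t) = false := by
          simpa using h0
        rw [h0'] at hf
        have hb : pvB_rank (t :: ts) p0 = pvB_rank ts p0 + 1 := by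
          rw [pv_rank_cons, if_neg (by simp [h0'])]
        rw [hb]
        apply pv_minLoop_find_zero _ _ _ _ _ (by omega)
        rw [hpred]
        exact hf
    | none =>
      have hA : pvA_find (t :: ts) (p0 :: rest) = pvA_find ts (p0 :: rest) := by
        unfold pvA_find; rw [hf]; cases ts <;> rfl
      rw [hA]
      have hnone : ∀ p ∈ p0 :: rest, ¬ ((PySem.Dict.mk p).get? "type" == some t) = true :=
        List.find?_eq_none.mp hf
      -- every photo's rank under (t :: ts) is its rank under ts plus one
      have hshift : ∀ p ∈ p0 :: rest, pvB_rank (t :: ts) p = pvB_rank ts p + 1 := by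
        intro p hp
        rw [pv_rank_cons, if_neg (hnone p hp)]
      rw [hshift p0 (List.mem_cons_self ..),
        pv_minLoop_shift (pvB_rank ts) (pvB_rank (t :: ts)) rest p0 (pvB_rank ts p0)
          (fun p hp => hshift p (List.mem_cons_of_mem _ hp))]
      exact ih

-- ===== VERDICT (by name: the statement is the Claim_ definition above) =====
theorem first_photo_spec : Claim_equal_first_photo := by
  intro plant preferred _
  unfold Spec_first_photo first_photo first_photo_alt
  cases (PySem.Dict.mk plant).get? "photos" with
  | none => rfl
  | some photos =>
    simp only [pvB_defaultOrder]
    have hval : pvB_valid = (fun p : List (String × String) =>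
        match (PySem.Dict.mk p).get? "url" with
        | some u => !(u == "")
        | none => false) := rfl
    rw [hval]
    split_ifs with h1 h2
    · rfl
    · rfl
    · cases hv : photos.filter (fun p =>
          match (PySem.Dict.mk p).get? "url" with
          | some u => !(u == "")
          | none => false) with
      | nil => rw [hv] at h2; simp at h2
      | cons p0 rest =>
        simp only [pvB_min]
        rw [pv_min_eq_find]
        cases pvA_find _ (p0 :: rest) with
        | none => simp [PySem.List.pyGet?, PySem.List.pyIdx?]
        | some q => rfl
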